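-- pv_equiv track=rewrite | github.com/willjhliang/public-garden | format.py | format_wikilink_header
-- ===== SOURCE A (Python) =====
-- def format_wikilink_header(data):
--     ret, in_header = '', False
--
--     i = 0
--     while i < len(data):
--         if i - 6 >= 0 and data[i-6:i] == '.html#':
--             in_header = True
--         if in_header and data[i] == ')':
--             in_header = False
--
--         if in_header:
--             if data[i] == ' ':
--                 ret += '-'
--             elif data[i].isalnum():
--                 ret += data[i].lower()
--         else:
--             ret += data[i]
--         i += 1
--
--     return ret
-- ===== SOURCE B (Python) =====
-- def format_wikilink_header(data):
--     pieces = []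
--     i = 0
--     while True:
--         j = data.find('.html#', i)
--         if j == -1:
--             pieces.append(data[i:])
--             break
--         pieces.append(data[i:j + 6])
--         k = data.find(')', j + 6)
--         end = len(data) if k == -1 else k
--         pieces.append(''.join(
--             '-' if c == ' ' else c.lower()
--             for c in data[j + 6:end] if c == ' ' or c.isalnum()))
--         if k != -1:
--             pieces.append(')')
--         i = end + 1
--     return ''.join(pieces)
-- ===== Notes on version B (the rewrite author's own statement) =====
-- stated objective: faster
-- what changed: Replaced A's per-character state machine (index loop, in_header flag, character-by-character string concatenation) by find-based segment processing: locate each anchor marker with str.find, copy the gap verbatim including the marker, transform the slice up to the region-closing parenthesis (or end of string) in one comprehension, and join the collected pieces once.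
import Mathlib
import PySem

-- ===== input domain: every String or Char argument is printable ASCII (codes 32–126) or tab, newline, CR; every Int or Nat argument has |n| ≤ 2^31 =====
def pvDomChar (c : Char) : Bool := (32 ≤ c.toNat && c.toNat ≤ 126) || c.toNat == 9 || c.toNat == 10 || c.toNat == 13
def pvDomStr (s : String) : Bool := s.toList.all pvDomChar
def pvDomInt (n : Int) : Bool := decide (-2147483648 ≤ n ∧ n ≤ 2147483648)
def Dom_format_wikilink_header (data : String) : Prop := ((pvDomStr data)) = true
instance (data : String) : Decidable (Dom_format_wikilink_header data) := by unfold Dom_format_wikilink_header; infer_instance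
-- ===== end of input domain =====

-- B replaces A's per-character in_header state machine by find-based segment processing; objective: alternative decomposition, same value.

-- ===== PORT A =====
def pvPat : List Char := ['.', 'h', 't', 'm', 'l', '#']

-- while-loop of A: index i, accumulator ret, flag in_header; 'i - 6 >= 0' is '6 <= i' (i : Nat counts loop steps)
def pvAGo (cs : List Char) (i : Nat) (ret : List Char) (inh : Bool) : List Char :=
  if h : i < cs.length then
    let inh1 := if 6 ≤ i ∧ PySem.List.slice cs (some ((i : Int) - 6)) (some (i : Int)) = pvPat then true else inh
    let inh2 := if inh1 = true ∧ cs[i] = ')' then false else inh1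
    let ret' := if inh2 then
        if cs[i] = ' ' then ret ++ ['-']
        else if PySem.Chars.isalnum cs[i] then ret ++ [PySem.Chars.lowerChar cs[i]]
        else ret
      else ret ++ [cs[i]]
    pvAGo cs (i + 1) ret' inh2
  else ret
termination_by cs.length - i

def format_wikilink_header (data : String) : String :=
  String.ofList (pvAGo data.toList 0 [] false)

-- ===== PORT B =====
-- helper of B's transform(): '-' for space, lower-cased alnum, everything else dropped
def pvTrans (cs : List Char) : List Char :=
  cs.filterMap fun c =>
    if c = ' ' then some '-'
    else if PySem.Chars.isalnum c then some (PySem.Chars.lowerChar c)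
    else none

-- lemmas cited by pvBGo's decreasing_by (termination of B's while loop)
lemma pvFindFrom_gt (cs sub : List Char) (i : Nat) (h : cs.length < i) :
    PySem.Chars.findFrom cs sub (i : Int) none = -1 := by
  unfold PySem.Chars.findFrom
  have h1 : ¬ ((i:Int) < 0) := by omega
  simp only [h1, if_false]
  rw [if_pos (by exact_mod_cast h)]

lemma pvPrefix_len {sub cs : List Char} {n : Nat} (hsub : sub ≠ []) (h : sub <+: cs.drop n) :
    n + sub.length ≤ cs.length := by
  have := h.length_le
  simp only [List.length_drop] at this
  -- n could exceed length; then drop is [] and sub = [] ... length_le gives sub.length ≤ len - n (Nat sub!)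
  by_cases hn : n ≤ cs.length
  · omega
  · rw [List.drop_eq_nil_of_le (by omega : cs.length ≤ n)] at h
    exact absurd (List.prefix_nil.mp h) hsub

lemma pvFindFrom_facts (cs sub : List Char) (i : Nat)
    (h : PySem.Chars.findFrom cs sub (i : Int) none ≠ -1) :
    0 ≤ PySem.Chars.findFrom cs sub (i : Int) none ∧
    i ≤ (PySem.Chars.findFrom cs sub (i : Int) none).toNat ∧
    sub <+: cs.drop (PySem.Chars.findFrom cs sub (i : Int) none).toNat ∧
    ∀ m : Nat, i ≤ m → m < (PySem.Chars.findFrom cs sub (i : Int) none).toNat →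
      ¬ sub <+: cs.drop m := by
  by_cases hi : i ≤ cs.length
  · obtain ⟨h1, h2, h3⟩ := PySem.Chars.findFrom_natCast_spec cs sub i hi h
    exact ⟨le_trans (Int.natCast_nonneg i) h1, by omega, h2, h3⟩
  · exact absurd (pvFindFrom_gt cs sub i (by omega)) h

-- B's while loop: find the next '.html#', copy up to and including it, transform up to the
-- next ')' (or end of string), copy the ')' and continue after it.
def pvBGo (cs : List Char) (i : Nat) : List Char :=
  let j := PySem.Chars.findFrom cs pvPat (i : Int) none
  if hj : j = -1 then
    PySem.List.slice cs (some (i : Int)) none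
  else
    let seg := PySem.List.slice cs (some (i : Int)) (some (j + 6))
    let k := PySem.Chars.findFrom cs [')'] (j + 6) none
    if hk : k = -1 then
      seg ++ pvTrans (PySem.List.slice cs (some (j + 6)) none)
    else
      seg ++ pvTrans (PySem.List.slice cs (some (j + 6)) (some k)) ++ [')'] ++ pvBGo cs (k.toNat + 1)
termination_by cs.length + 1 - i
decreasing_by
  obtain ⟨hj0, hij, hpre, -⟩ := pvFindFrom_facts cs pvPat i hj
  have h6 : (PySem.Chars.findFrom cs pvPat (i : Int) none).toNat + 6 ≤ cs.length := by
    have := pvPrefix_len (by simp [pvPat]) hpre; simpa [pvPat] using this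
  have hcast : PySem.Chars.findFrom cs pvPat (i : Int) none + 6 =
      (((PySem.Chars.findFrom cs pvPat (i : Int) none).toNat + 6 : Nat) : Int) := by omega
  have hk' : PySem.Chars.findFrom cs [')']
      ((((PySem.Chars.findFrom cs pvPat (i : Int) none).toNat + 6 : Nat) : Int)) none ≠ -1 := by
    rw [← hcast]; exact hk
  obtain ⟨hk0, hjk, hkpre, -⟩ := pvFindFrom_facts cs [')'] _ hk'
  have hklen := pvPrefix_len (by simp) hkpre
  simp only [List.length_cons, List.length_nil] at hklen
  rw [hcast]
  omega

def format_wikilink_header_alt (data : String) : String :=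
  String.ofList (pvBGo data.toList 0)

-- ===== PRECONDITION & SPEC =====
def Spec_format_wikilink_header (data : String) (out : String) : Prop := out = format_wikilink_header_alt data
instance (data : String) (out : String) : Decidable (Spec_format_wikilink_header data out) := by unfold Spec_format_wikilink_header; infer_instance

-- ===== CLAIM (what is proved, stated in full; the proofs are below) =====
def Claim_equal_format_wikilink_header : Prop := ∀ (data : String), Dom_format_wikilink_header data → Spec_format_wikilink_header data (format_wikilink_header data)

-- ===== LEMMAS AND PROOFS =====

lemma pvRP_at {cs : List Char} {q : Nat} (h : [')'] <+: cs.drop q) :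
    ∃ hq : q < cs.length, cs[q] = ')' := by
  have hq : q < cs.length := by have := pvPrefix_len (by simp) h; simp at this; omega
  rw [List.drop_eq_getElem_cons hq] at h
  exact ⟨hq, (List.cons_prefix_cons.mp h).1.symm⟩

lemma pvRP_of {cs : List Char} {q : Nat} (hq : q < cs.length) (h : cs[q] = ')') :
    [')'] <+: cs.drop q := by
  rw [List.drop_eq_getElem_cons hq, h]
  exact ⟨cs.drop (q+1), rfl⟩

lemma pvWindow_iff (cs : List Char) (p : Nat) (h6 : 6 ≤ p) :
    PySem.List.slice cs (some ((p : Int) - 6)) (some (p : Int)) = pvPat ↔ pvPat <+: cs.drop (p - 6) := by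
  have hc : (p : Int) - 6 = ((p - 6 : Nat) : Int) := by omega
  rw [hc, PySem.List.slice_natCast]
  have h2 : p - (p - 6) = 6 := by omega
  rw [h2]
  rw [List.prefix_iff_eq_take]
  constructor <;> intro hh <;> simp [pvPat] at hh ⊢ <;> exact hh.symm

lemma pvTrans_cons (c : Char) (t : List Char) :
    pvTrans (c :: t) = (if c = ' ' then ['-'] else if PySem.Chars.isalnum c then [PySem.Chars.lowerChar c] else []) ++ pvTrans t := by
  simp only [pvTrans, List.filterMap_cons]
  split_ifs <;> simp

lemma pvAGo_false_eq_true (cs : List Char) (m : Nat) (ret : List Char)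
    (hw : 6 ≤ m ∧ pvPat <+: cs.drop (m - 6)) :
    pvAGo cs m ret false = pvAGo cs m ret true := by
  by_cases h : m < cs.length
  · rw [pvAGo, pvAGo]
    have hsl : PySem.List.slice cs (some ((m : Int) - 6)) (some (m : Int)) = pvPat :=
      (pvWindow_iff cs m hw.1).mpr hw.2
    simp [h, hw.1, hsl]
  · rw [pvAGo, pvAGo]; simp [h]

lemma pvAGo_off_skip (cs : List Char) (m : Nat) (hm : m ≤ cs.length) :
    ∀ d i, m - i = d → i ≤ m →
    (∀ p, i ≤ p → p < m → ¬(6 ≤ p ∧ pvPat <+: cs.drop (p - 6))) →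
    ∀ ret, pvAGo cs i ret false = pvAGo cs m (ret ++ (cs.drop i).take (m - i)) false := by
  intro d
  induction d with
  | zero =>
    intro i hd him hno ret
    have : i = m := by omega
    subst this
    simp [hd]
  | succ d ih =>
    intro i hd him hno ret
    have hilt : i < m := by omega
    have h : i < cs.length := by omega
    rw [pvAGo]
    have hcond : ¬(6 ≤ i ∧ PySem.List.slice cs (some ((i : Int) - 6)) (some (i : Int)) = pvPat) := by
      rintro ⟨a, b⟩
      exact hno i le_rfl hilt ⟨a, (pvWindow_iff cs i a).mp b⟩
    simp only [dif_pos h, if_neg hcond, Bool.false_eq_true, false_and, if_neg (by simp : ¬(False ∧ cs[i] = ')')), if_false]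
    rw [ih (i + 1) (by omega) (by omega) (fun p hp1 hp2 => hno p (by omega) hp2)]
    congr 1
    rw [List.drop_eq_getElem_cons h]
    have h2 : m - i = (m - (i + 1)) + 1 := by omega
    rw [h2, List.take_succ_cons]
    simp

lemma pvAGo_on_noRP (cs : List Char) :
    ∀ d i, cs.length - i = d →
    (∀ q, i ≤ q → (hq : q < cs.length) → cs[q] ≠ ')') →
    ∀ ret, pvAGo cs i ret true = ret ++ pvTrans (cs.drop i) := by
  intro d
  induction d with
  | zero =>
    intro i hd hno ret
    rw [pvAGo]
    rw [List.drop_eq_nil_of_le (by omega)]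
    simp only [dif_neg (by omega : ¬ i < cs.length)]
    simp [pvTrans]
  | succ d ih =>
    intro i hd hno ret
    have h : i < cs.length := by omega
    rw [pvAGo]
    simp only [dif_pos h]
    have hne : cs[i] ≠ ')' := hno i le_rfl h
    have hinh1 : (if 6 ≤ i ∧ PySem.List.slice cs (some ((i : Int) - 6)) (some (i : Int)) = pvPat then true else true) = true := by
      split_ifs <;> rfl
    simp only [hinh1, eq_self_iff_true, true_and, if_neg hne, if_true]
    rw [ih (i + 1) (by omega) (fun q hq => hno q (by omega)), List.drop_eq_getElem_cons h, pvTrans_cons]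
    split_ifs <;> simp

lemma pvAGo_on_RP (cs : List Char) (k : Nat) (hk : k < cs.length) (hck : cs[k] = ')') :
    ∀ d i, k - i = d → i ≤ k →
    (∀ q, i ≤ q → q < k → (hq : q < cs.length) → cs[q] ≠ ')') →
    ∀ ret, pvAGo cs i ret true =
      pvAGo cs (k + 1) (ret ++ pvTrans ((cs.drop i).take (k - i)) ++ [')']) false := by
  intro d
  induction d with
  | zero =>
    intro i hd him hno ret
    have : i = k := by omega
    subst this
    rw [pvAGo]
    simp only [dif_pos hk]
    have hinh1 : (if 6 ≤ i ∧ PySem.List.slice cs (some ((i : Int) - 6)) (some (i : Int)) = pvPat then true else true) = true := by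
      split_ifs <;> rfl
    simp only [hinh1, eq_self_iff_true, true_and, if_pos hck, Bool.false_eq_true, if_false]
    simp [pvTrans, hck]
  | succ d ih =>
    intro i hd him hno ret
    have h : i < cs.length := by omega
    rw [pvAGo]
    simp only [dif_pos h]
    have hne : cs[i] ≠ ')' := hno i le_rfl (by omega) h
    have hinh1 : (if 6 ≤ i ∧ PySem.List.slice cs (some ((i : Int) - 6)) (some (i : Int)) = pvPat then true else true) = true := by
      split_ifs <;> rfl
    simp only [hinh1, eq_self_iff_true, true_and, if_neg hne, if_true]
    rw [ih (i + 1) (by omega) (by omega) (fun q hq1 => hno q (by omega))]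
    congr 2
    rw [List.drop_eq_getElem_cons h]
    have h2 : k - i = (k - (i + 1)) + 1 := by omega
    rw [h2, List.take_succ_cons, pvTrans_cons]
    split_ifs <;> simp

lemma pvPat_ne_rp : ∀ t, t < 6 → pvPat[t]? ≠ some ')' := by decide

lemma pvMain (cs : List Char) : ∀ n i, cs.length + 1 - i ≤ n →
    (∀ s : Nat, s < i → i ≤ s + 6 → ¬ pvPat <+: cs.drop s) →
    ∀ ret, pvAGo cs i ret false = ret ++ pvBGo cs i := by
  intro n
  induction n with
  | zero =>
    intro i hn H ret
    have hgt : cs.length < i := by omega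
    rw [pvAGo, pvBGo]
    simp only [dif_neg (by omega : ¬ i < cs.length), pvFindFrom_gt cs pvPat i hgt, dif_pos rfl,
      PySem.List.slice_from_natCast, List.drop_eq_nil_of_le (by omega : cs.length ≤ i), List.append_nil]
    simp
  | succ n ih =>
    intro i hn H ret
    by_cases hil : cs.length < i
    · rw [pvAGo, pvBGo]
      simp only [dif_neg (by omega : ¬ i < cs.length), pvFindFrom_gt cs pvPat i hil, dif_pos rfl,
        PySem.List.slice_from_natCast, List.drop_eq_nil_of_le (by omega : cs.length ≤ i), List.append_nil]
      simp
    · have hile : i ≤ cs.length := by omega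
      by_cases hj : PySem.Chars.findFrom cs pvPat (i : Int) none = -1
      · -- no further '.html#': everything verbatim
        have hocc : ¬ pvPat <:+: cs.drop i :=
          (PySem.Chars.findFrom_natCast_eq_neg_one_iff cs pvPat i hile).mp hj
        have hno : ∀ p, i ≤ p → p < cs.length → ¬(6 ≤ p ∧ pvPat <+: cs.drop (p - 6)) := by
          rintro p hip hpl ⟨h6p, hoccp⟩
          rcases lt_or_ge (p - 6) i with hsi | hsi
          · exact H (p - 6) hsi (by omega) hoccp
          · apply hocc
            have hdd : cs.drop (p - 6) = (cs.drop i).drop (p - 6 - i) := by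
              rw [List.drop_drop]; congr 1; omega
            rw [hdd] at hoccp
            exact hoccp.isInfix.trans (List.drop_suffix _ _).isInfix
        rw [pvAGo_off_skip cs cs.length le_rfl (cs.length - i) i rfl hile hno ret]
        rw [pvAGo]
        simp only [dif_neg (by omega : ¬ cs.length < cs.length)]
        rw [pvBGo]
        simp only [hj, dif_pos rfl, PySem.List.slice_from_natCast]
        congr 1
        exact List.take_of_length_le (by simp)
      · obtain ⟨hj0, hij, hpre, hjmin⟩ := pvFindFrom_facts cs pvPat i hj
        set j := PySem.Chars.findFrom cs pvPat (i : Int) none with hjdef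
        set jn := j.toNat with hjndef
        have h6 : jn + 6 ≤ cs.length := by
          have := pvPrefix_len (by simp [pvPat]) hpre; simpa [pvPat] using this
        have hcast : j + 6 = ((jn + 6 : Nat) : Int) := by omega
        -- verbatim up to jn+6
        have hno1 : ∀ p, i ≤ p → p < jn + 6 → ¬(6 ≤ p ∧ pvPat <+: cs.drop (p - 6)) := by
          rintro p hip hpl ⟨h6p, hoccp⟩
          rcases lt_or_ge (p - 6) i with hsi | hsi
          · exact H (p - 6) hsi (by omega) hoccp
          · exact hjmin (p - 6) hsi (by omega) hoccp
        rw [pvAGo_off_skip cs (jn + 6) h6 (jn + 6 - i) i rfl (by omega) hno1 ret]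
        rw [pvAGo_false_eq_true cs (jn + 6) _ ⟨by omega, by simpa using hpre⟩]
        by_cases hk : PySem.Chars.findFrom cs [')'] (j + 6) none = -1
        · -- region runs to end of string
          have hk2 : PySem.Chars.findFrom cs [')'] ((jn + 6 : Nat) : Int) none = -1 := by
            rw [← hcast]; exact hk
          have hnorp : ¬ ([')'] : List Char) <:+: cs.drop (jn + 6) :=
            (PySem.Chars.findFrom_natCast_eq_neg_one_iff cs [')'] (jn + 6) h6).mp hk2
          have hno2 : ∀ q, jn + 6 ≤ q → (hq : q < cs.length) → cs[q] ≠ ')' := by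
            intro q hq1 hq2 hcq
            apply hnorp
            have := pvRP_of hq2 hcq
            have hdd : cs.drop q = (cs.drop (jn + 6)).drop (q - (jn + 6)) := by
              rw [List.drop_drop]; congr 1; omega
            rw [hdd] at this
            exact this.isInfix.trans (List.drop_suffix _ _).isInfix
          rw [pvAGo_on_noRP cs (cs.length - (jn + 6)) (jn + 6) rfl hno2]
          conv_rhs => rw [pvBGo]
          rw [← hjdef, dif_neg hj, hcast, dif_pos hk2]
          simp only [PySem.List.slice_natCast, PySem.List.slice_from_natCast]
          simp
        · -- region ends at the first ')'
          have hk2 : PySem.Chars.findFrom cs [')'] ((jn + 6 : Nat) : Int) none ≠ -1 := by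
            rw [← hcast]; exact hk
          obtain ⟨hk0, hjk, hkpre, hkmin⟩ := pvFindFrom_facts cs [')'] (jn + 6) hk2
          set kw := PySem.Chars.findFrom cs [')'] ((jn + 6 : Nat) : Int) none with hkwdef
          set kn := kw.toNat with hkndef
          obtain ⟨hknl, hckn⟩ := pvRP_at hkpre
          have hno3 : ∀ q, jn + 6 ≤ q → q < kn → (hq : q < cs.length) → cs[q] ≠ ')' := by
            intro q hq1 hq2 hq3 hcq
            exact hkmin q hq1 hq2 (pvRP_of hq3 hcq)
          rw [pvAGo_on_RP cs kn hknl hckn (kn - (jn + 6)) (jn + 6) rfl (by omega) hno3]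
          -- next restart point kn + 1: no pvPat occurrence straddles it (cs[kn] = ')')
          have H2 : ∀ s : Nat, s < kn + 1 → kn + 1 ≤ s + 6 → ¬ pvPat <+: cs.drop s := by
            intro s hs1 hs2 hocc
            have ht : kn - s < 6 := by omega
            have htake : (cs.drop s).take 6 = pvPat := (List.prefix_iff_eq_take.mp hocc).symm
            have h1 : pvPat[kn - s]? = (cs.drop s)[kn - s]? := by
              rw [← htake, List.getElem?_take_of_lt ht]
            have h2 : (cs.drop s)[kn - s]? = cs[kn]? := by
              rw [List.getElem?_drop]
              congr 1
              omega
            have h3 : cs[kn]? = some ')' := by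
              rw [List.getElem?_eq_getElem hknl, hckn]
            exact pvPat_ne_rp (kn - s) ht (h1.trans (h2.trans h3))
          rw [ih (kn + 1) (by omega) H2]
          have hkcast : kw = ((kn : Nat) : Int) := by omega
          conv_rhs => rw [pvBGo]
          rw [← hjdef, dif_neg hj, hcast, ← hkwdef, dif_neg hk2, hkcast]
          simp only [PySem.List.slice_natCast, Int.toNat_natCast]
          simp

-- ===== VERDICT (by name: the statement is the Claim_ definition above) =====
theorem format_wikilink_header_spec : Claim_equal_format_wikilink_header := by
  intro data _
  unfold Spec_format_wikilink_header format_wikilink_header format_wikilink_header_alt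
  have := pvMain data.toList (data.toList.length + 1) 0 (by omega)
    (fun s hs _ => absurd hs (by omega)) []
  simpa using congrArg String.ofList this
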